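-- pv_equiv track=rewrite | github.com/ARAldhafeeri/whale-rider | agent.py | _basic_coding_task_check
-- ===== SOURCE A (Python) =====
-- def _basic_coding_task_check(description: str) -> bool:
--     """Fallback keyword-based coding task detection"""
--     coding_phrases = {
--         "write code", "create a program", "develop software",
--         "build an app", "implement an algorithm", "write a script",
--         "create a library", "develop a module", "debug the code",
--         "refactor the", "optimize the", "programming solution"
--     }
--     description_lower = description.lower()
--     return any(phrase in description_lower for phrase in coding_phrases)
-- ===== SOURCE B (Python) =====
-- _PHRASES = (
--     "write code", "create a program", "develop software",
--     "build an app", "implement an algorithm", "write a script",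
--     "create a library", "develop a module", "debug the code",
--     "refactor the", "optimize the", "programming solution",
-- )
--
-- def _basic_coding_task_check(description: str) -> bool:
--     """Single left-to-right scan: at each position, test whether one of the
--     phrases starts there (instead of twelve independent substring searches)."""
--     s = description.lower()
--     for i in range(len(s)):
--         for p in _PHRASES:
--             if s.startswith(p, i):
--                 return True
--     return False
-- ===== Notes on version B (the rewrite author's own statement) =====
-- stated objective: alternative
-- what changed: A runs twelve independent substring-membership searches over the lowercased string; B lowercases once and makes a single left-to-right scan, testing at each start position whether any phrase begins there, returning on the first hit (trades the C-level searches for one explicit pass).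
import Mathlib
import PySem

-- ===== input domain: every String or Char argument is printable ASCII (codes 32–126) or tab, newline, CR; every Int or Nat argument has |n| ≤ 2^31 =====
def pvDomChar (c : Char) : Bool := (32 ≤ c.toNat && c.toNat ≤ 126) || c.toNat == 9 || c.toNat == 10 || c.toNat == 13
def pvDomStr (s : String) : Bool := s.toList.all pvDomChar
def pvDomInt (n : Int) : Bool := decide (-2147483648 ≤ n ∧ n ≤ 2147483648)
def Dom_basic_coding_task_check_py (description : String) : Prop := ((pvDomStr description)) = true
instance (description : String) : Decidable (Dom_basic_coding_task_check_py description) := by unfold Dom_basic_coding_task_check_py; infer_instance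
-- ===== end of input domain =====

-- ===== PORT A =====
-- B changes only the search strategy; same boolean result (header: one scan vs twelve substring searches).
def codingPhrases : List String :=
  ["write code", "create a program", "develop software",
   "build an app", "implement an algorithm", "write a script",
   "create a library", "develop a module", "debug the code",
   "refactor the", "optimize the", "programming solution"]

def basic_coding_task_check_py (description : String) : Bool :=
  let description_lower := PySem.Str.lower description
  (PySem.Set.ofList codingPhrases).any (fun phrase => PySem.Str.isIn phrase description_lower)

-- ===== PORT B =====
-- Source B's outer loop over start positions i becomes recursion over the suffixes of the lowered char list;
-- s.startswith(p, i) is the prefix test on the current suffix.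
def altScan (l : List Char) : Bool :=
  match l with
  | [] => false
  | _ :: t => codingPhrases.any (fun p => p.toList.isPrefixOf l) || altScan t

def basic_coding_task_check_py_alt (description : String) : Bool :=
  altScan (PySem.Str.lower description).toList

-- ===== PRECONDITION & SPEC =====
def Spec_basic_coding_task_check_py (description : String) (out : Bool) : Prop := out = basic_coding_task_check_py_alt description
instance (description : String) (out : Bool) : Decidable (Spec_basic_coding_task_check_py description out) := by unfold Spec_basic_coding_task_check_py; infer_instance

-- ===== CLAIM (what is proved, stated in full; the proofs are below) =====
def Claim_equal_basic_coding_task_check_py : Prop := ∀ (description : String), Dom_basic_coding_task_check_py description → Spec_basic_coding_task_check_py description (basic_coding_task_check_py description)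

-- ===== LEMMAS AND PROOFS =====

lemma altScan_eq_any_isIn (l : List Char)
    (hne : ∀ p ∈ codingPhrases, p.toList ≠ []) :
    altScan l = codingPhrases.any (fun p => PySem.Chars.isIn p.toList l) := by
  induction l with
  | nil =>
    simp only [altScan]
    symm
    simp only [List.any_eq_false]
    intro p hp
    simp only [Bool.not_eq_true, PySem.Chars.isIn_eq_false_iff, List.infix_nil]
    exact hne p hp
  | cons c t ih =>
    simp only [altScan, ih]
    rw [Bool.eq_iff_iff]
    simp only [Bool.or_eq_true, List.any_eq_true, PySem.Chars.isIn_iff_infix,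
      List.isPrefixOf_iff_prefix, List.infix_cons_iff]
    constructor
    · rintro (⟨p, hp, h⟩ | ⟨p, hp, h⟩)
      · exact ⟨p, hp, Or.inl h⟩
      · exact ⟨p, hp, Or.inr h⟩
    · rintro ⟨p, hp, h | h⟩
      · exact Or.inl ⟨p, hp, h⟩
      · exact Or.inr ⟨p, hp, h⟩

-- ===== VERDICT (by name: the statement is the Claim_ definition above) =====
theorem basic_coding_task_check_py_spec : Claim_equal_basic_coding_task_check_py := by
  intro description _
  unfold Spec_basic_coding_task_check_py basic_coding_task_check_py basic_coding_task_check_py_alt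
  rw [altScan_eq_any_isIn _ (by decide)]
  rw [Bool.eq_iff_iff]
  simp only [List.any_eq_true, PySem.Set.mem_ofList, PySem.Str.isIn_eq,
    PySem.Chars.isIn_iff_infix]
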